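-- pv_equiv track=rewrite | github.com/aojsd/GPU_Offloading | src/MoE/moe_engine.py | _compute_chunk_sizes
-- ===== SOURCE A (Python) =====
-- def _compute_chunk_sizes(total_tokens, graph_sizes):
--     """Compute chunk sizes for chunked prefill using greedy largest-first.
--
--     While remaining > max graph size, use max at full capacity.
--     When remaining fits in a single graph, use smallest covering graph.
--     This minimizes the number of chunks.
--
--     Args:
--         total_tokens: total number of prompt tokens
--         graph_sizes: list of available graph sizes
--     Returns:
--         list of (actual_tokens, graph_N) tuples
--     """
--     sorted_sizes = sorted(graph_sizes)
--     largest = sorted_sizes[-1]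
--     chunks = []
--     remaining = total_tokens
--     while remaining > 0:
--         # Can remaining fit in a single graph?
--         covering = [gs for gs in sorted_sizes if gs >= remaining]
--         if covering:
--             chunks.append((remaining, min(covering)))
--             remaining = 0
--         else:
--             # Use largest graph at full capacity
--             chunks.append((largest, largest))
--             remaining -= largest
--     return chunks
-- ===== SOURCE B (Python) =====
-- def _compute_chunk_sizes(total_tokens, graph_sizes):
--     """Closed-form version: count full largest-size chunks by division,
--     then pick the smallest covering graph for the leftover in one scan."""
--     sorted_sizes = sorted(graph_sizes)
--     largest = sorted_sizes[-1]
--     if total_tokens <= 0: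
--         return []
--     k = (total_tokens - 1) // largest        # number of full chunks
--     leftover = total_tokens - k * largest    # 0 < leftover <= largest
--     cover = next(gs for gs in sorted_sizes if gs >= leftover)
--     return [(largest, largest)] * k + [(leftover, cover)]
-- ===== Notes on version B (the rewrite author's own statement) =====
-- stated objective: alternative
-- what changed: Replaces the greedy subtract-one-chunk-at-a-time loop (which filters the whole size list each iteration) with a closed-form division giving the number of full chunks plus one scan of the sorted list for the leftover's covering size (intended as faster; a timing run measured large speedups but could not confirm at the largest size, where the output list itself is huge).
-- outside the precondition, e.g. on _compute_chunk_sizes(5, []): A raises IndexError, B raises IndexError; on _compute_chunk_sizes(5, [0, -2]): A does not finish within the time limit, B raises ZeroDivisionError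
import Mathlib
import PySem

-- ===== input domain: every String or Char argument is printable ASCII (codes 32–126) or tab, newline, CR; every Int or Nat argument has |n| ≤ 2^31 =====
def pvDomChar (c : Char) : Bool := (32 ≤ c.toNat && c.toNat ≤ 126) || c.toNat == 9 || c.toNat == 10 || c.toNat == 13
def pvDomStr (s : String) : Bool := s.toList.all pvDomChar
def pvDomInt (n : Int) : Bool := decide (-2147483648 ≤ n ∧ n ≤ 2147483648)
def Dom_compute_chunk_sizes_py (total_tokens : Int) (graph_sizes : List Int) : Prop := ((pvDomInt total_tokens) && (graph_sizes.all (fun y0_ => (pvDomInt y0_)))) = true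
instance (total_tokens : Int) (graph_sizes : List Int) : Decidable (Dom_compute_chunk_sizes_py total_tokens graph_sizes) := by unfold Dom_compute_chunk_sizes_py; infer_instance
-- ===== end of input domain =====

-- B replaces A's greedy subtract-a-chunk loop by a closed-form full-chunk count plus one scan for the leftover's covering size.


-- ===== PORT A =====
-- the while-loop; fuel = total_tokens.toNat + 1 suffices since each full chunk removes largest ≥ 1 tokens (under Pre_)
def pvALoop (ss : List Int) (largest : Int) (remaining : Int) (chunks : List (Int × Int)) : Nat → List (Int × Int)
  | 0 => chunks
  | Nat.succ f =>
    if 0 < remaining then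
      -- covering = [gs for gs in sorted_sizes if gs >= remaining]; if covering: append (remaining, min(covering))
      match PySem.List.min? ((ss.filter (fun gs => decide (remaining ≤ gs)))) (fun x => x) with
      | some m => chunks ++ [(remaining, m)]        -- then remaining = 0, loop exits
      | none => pvALoop ss largest (remaining - largest) (chunks ++ [(largest, largest)]) f
    else chunks

def compute_chunk_sizes_py (total_tokens : Int) (graph_sizes : List Int) : List (Int × Int) :=
  let sorted_sizes := PySem.List.sorted graph_sizes (fun x => x)
  match PySem.List.pyGet? sorted_sizes (-1) with
  | none => []   -- Python raises IndexError here (graph_sizes = []), excluded by Pre_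
  | some largest => pvALoop sorted_sizes largest total_tokens [] (total_tokens.toNat + 1)

-- ===== PORT B =====
def compute_chunk_sizes_py_alt (total_tokens : Int) (graph_sizes : List Int) : List (Int × Int) :=
  let sorted_sizes := PySem.List.sorted graph_sizes (fun x => x)
  match PySem.List.pyGet? sorted_sizes (-1) with
  | none => []   -- Python raises IndexError here, excluded by Pre_
  | some largest =>
    if total_tokens ≤ 0 then []
    else
      let k := PySem.Int.floordiv (total_tokens - 1) largest
      let leftover := total_tokens - k * largest
      match sorted_sizes.find? (fun gs => decide (leftover ≤ gs)) with
      | some cover => List.replicate k.toNat (largest, largest) ++ [(leftover, cover)]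
      | none => []   -- Python raises StopIteration here, unreachable under Pre_

-- ===== PRECONDITION & SPEC =====
-- Pre_ excludes graph_sizes = [] (A raises IndexError) and inputs with 0 < total_tokens but no
-- positive graph size, on which A's while loop never terminates (B raises or returns junk there).
def Pre_compute_chunk_sizes_py (total_tokens : Int) (graph_sizes : List Int) : Prop :=
  graph_sizes ≠ [] ∧ (0 < total_tokens → ∃ g ∈ graph_sizes, 0 < g)
instance (total_tokens : Int) (graph_sizes : List Int) : Decidable (Pre_compute_chunk_sizes_py total_tokens graph_sizes) := by unfold Pre_compute_chunk_sizes_py; infer_instance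

def pvWitness_compute_chunk_sizes_py : Int × List Int := (11, [2, 4, 3])

def Spec_compute_chunk_sizes_py (total_tokens : Int) (graph_sizes : List Int) (out : List (Int × Int)) : Prop := out = compute_chunk_sizes_py_alt total_tokens graph_sizes
instance (total_tokens : Int) (graph_sizes : List Int) (out : List (Int × Int)) : Decidable (Spec_compute_chunk_sizes_py total_tokens graph_sizes out) := by unfold Spec_compute_chunk_sizes_py; infer_instance

-- ===== CLAIM (what is proved, stated in full; the proofs are below) =====
def Claim_equal_compute_chunk_sizes_py : Prop := ∀ (total_tokens : Int) (graph_sizes : List Int), Dom_compute_chunk_sizes_py total_tokens graph_sizes → Pre_compute_chunk_sizes_py total_tokens graph_sizes → Spec_compute_chunk_sizes_py total_tokens graph_sizes (compute_chunk_sizes_py total_tokens graph_sizes)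

-- ===== LEMMAS AND PROOFS =====

theorem pv_foldl_min_of_le (l : List Int) (a : Int) (h : ∀ y ∈ l, a ≤ y) : l.foldl min a = a := by
  induction l with
  | nil => rfl
  | cons x t ih =>
    have hax : a ≤ x := h x (by simp)
    simp [List.foldl, min_eq_left hax]
    exact ih (fun y hy => h y (by simp [hy]))

-- on an ascending list, min of the filtered sublist is its first satisfying element
theorem pv_min_filter_eq_find (ss : List Int) (p : Int → Bool) (hpw : ss.Pairwise (· ≤ ·)) :
    PySem.List.min? (ss.filter p) (fun x => x) = ss.find? p := by
  induction ss with
  | nil => rfl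
  | cons a t ih =>
    rw [List.pairwise_cons] at hpw
    by_cases hpa : p a
    · rw [List.filter_cons_of_pos hpa, List.find?_cons_of_pos hpa,
        PySem.List.min?_id_cons]
      have : (t.filter p).foldl min a = a := by
        apply pv_foldl_min_of_le
        intro y hy
        exact hpw.1 y (List.mem_of_mem_filter hy)
      rw [this]
    · rw [List.filter_cons_of_neg (by simpa using hpa),
        List.find?_cons_of_neg (by simpa using hpa)]
      exact ih hpw.2

theorem pv_getLast_max (l : List Int) (m : Int) (hpw : l.Pairwise (· ≤ ·))
    (h : l.getLast? = some m) : ∀ x ∈ l, x ≤ m := by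
  induction l with
  | nil => simp at h
  | cons a t ih =>
    intro x hx
    cases t with
    | nil =>
      simp at h hx; omega
    | cons b u =>
      rw [List.getLast?_cons_cons] at h
      rw [List.pairwise_cons] at hpw
      rcases List.mem_cons.mp hx with rfl | hx'
      · have hm : m ∈ b :: u := by
          have := List.mem_of_getLast? (l := b :: u) h
          exact this
        exact hpw.1 m hm
      · exact ih hpw.2 h x hx'

-- main loop characterisation
theorem pvALoop_eq (ss : List Int) (largest : Int)
    (hpw : ss.Pairwise (· ≤ ·)) (hmem : largest ∈ ss) (hmax : ∀ g ∈ ss, g ≤ largest) (hL : 0 < largest) :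
    ∀ (fuel : Nat) (remaining : Int) (chunks : List (Int × Int)),
      0 < remaining → remaining.toNat ≤ fuel →
      pvALoop ss largest remaining chunks fuel =
        chunks ++ List.replicate (PySem.Int.floordiv (remaining - 1) largest).toNat (largest, largest)
          ++ [(remaining - PySem.Int.floordiv (remaining - 1) largest * largest,
               (ss.find? (fun gs => decide (remaining - PySem.Int.floordiv (remaining - 1) largest * largest ≤ gs))).getD 0)] := by
  intro fuel
  induction fuel with
  | zero => intro r chunks hr hf; omega
  | succ f ih =>
    intro r chunks hr hf
    rw [pvALoop, if_pos hr, pv_min_filter_eq_find ss _ hpw]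
    by_cases hcov : r ≤ largest
    · -- last chunk
      have hk : PySem.Int.floordiv (r - 1) largest = 0 := by
        rw [PySem.Int.floordiv_eq_ediv_of_pos hL]
        exact Int.ediv_eq_zero_of_lt (by omega) (by omega)
      rw [hk]
      simp only [Int.toNat_zero, List.replicate_zero, zero_mul, sub_zero]
      have hsome : (ss.find? (fun gs => decide (r ≤ gs))).isSome := by
        rw [List.find?_isSome]
        exact ⟨largest, hmem, by simpa using hcov⟩
      obtain ⟨c, hc⟩ := Option.isSome_iff_exists.mp hsome
      rw [hc]
      simp
    · -- full chunk, recurse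
      rw [not_le] at hcov
      have hnone : ss.find? (fun gs => decide (r ≤ gs)) = none := by
        rw [List.find?_eq_none]
        intro g hg
        have := hmax g hg
        simp; omega
      rw [hnone]
      have hr' : 0 < r - largest := by omega
      have hf' : (r - largest).toNat ≤ f := by omega
      rw [ih (r - largest) (chunks ++ [(largest, largest)]) hr' hf']
      have hkstep : PySem.Int.floordiv (r - 1) largest
          = PySem.Int.floordiv (r - largest - 1) largest + 1 := by
        rw [PySem.Int.floordiv_eq_ediv_of_pos hL, PySem.Int.floordiv_eq_ediv_of_pos hL]
        have : r - 1 = (r - largest - 1) + 1 * largest := by ring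
        rw [this, Int.add_mul_ediv_right _ _ (by omega : largest ≠ 0)]
      have hknn : 0 ≤ PySem.Int.floordiv (r - largest - 1) largest := by
        rw [PySem.Int.floordiv_eq_ediv_of_pos hL]
        exact Int.ediv_nonneg (by omega) (by omega)
      have hlq : r - largest - PySem.Int.floordiv (r - largest - 1) largest * largest
          = r - PySem.Int.floordiv (r - 1) largest * largest := by
        rw [hkstep]; ring
      rw [hlq, hkstep]
      rw [show (PySem.Int.floordiv (r - largest - 1) largest + 1).toNat
          = (PySem.Int.floordiv (r - largest - 1) largest).toNat + 1 by omega]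
      rw [List.replicate_succ]
      simp

-- ===== VERDICT (by name: the statement is the Claim_ definition above) =====
theorem compute_chunk_sizes_py_spec : Claim_equal_compute_chunk_sizes_py := by
  intro total gs _ hpre
  obtain ⟨hne, hpos⟩ := hpre
  unfold Spec_compute_chunk_sizes_py compute_chunk_sizes_py compute_chunk_sizes_py_alt
  have hssne : PySem.List.sorted gs (fun x => x) ≠ [] := by
    simpa [PySem.List.sorted_eq_nil_iff] using hne
  obtain ⟨L, hL⟩ := Option.isSome_iff_exists.mp (List.getLast?_isSome.mpr hssne)
  have hpw : (PySem.List.sorted gs (fun x => x)).Pairwise (· ≤ ·) := by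
    simpa using PySem.List.sorted_pairwise (xs := gs) (key := fun x => x)
  have hmax : ∀ g ∈ PySem.List.sorted gs (fun x => x), g ≤ L :=
    pv_getLast_max _ _ hpw hL
  have hmem : L ∈ PySem.List.sorted gs (fun x => x) := List.mem_of_getLast? hL
  simp only [PySem.List.pyGet?_neg_one, hL]
  by_cases ht : total ≤ 0
  · rw [if_pos ht, pvALoop, if_neg (by omega)]
  · rw [if_neg ht]
    have htpos : 0 < total := by omega
    have hLpos : 0 < L := by
      obtain ⟨g, hg, hgpos⟩ := hpos htpos
      have hgss : g ∈ PySem.List.sorted gs (fun x => x) := by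
        simpa [PySem.List.mem_sorted] using hg
      have := hmax g hgss
      omega
    rw [pvALoop_eq _ _ hpw hmem hmax hLpos _ _ _ htpos (by omega)]
    set k := PySem.Int.floordiv (total - 1) L with hk
    have hkb : k * L ≤ total - 1 ∧ total - 1 < (k + 1) * L :=
      (PySem.Int.floordiv_eq_iff_of_pos hLpos).mp hk.symm
    have hleft : total - k * L ≤ L := by nlinarith [hkb.1, hkb.2]
    have hsome : ((PySem.List.sorted gs (fun x => x)).find?
        (fun gsz => decide (total - k * L ≤ gsz))).isSome := by
      rw [List.find?_isSome]
      exact ⟨L, hmem, by simpa using hleft⟩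
    obtain ⟨c, hc⟩ := Option.isSome_iff_exists.mp hsome
    rw [hc]
    simp
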